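-- pv_equiv track=rewrite | github.com/cdisc-org/cdisc-rules-engine | cdisc_rules_engine/utilities/utils.py | is_supp_dataset
-- ===== SOURCE A (Python) =====
-- from typing import Callable, List, Optional, Set, Union
--
-- def get_corresponding_datasets(datasets: List[dict], domain: str) -> List[dict]:
--     return [dataset for dataset in datasets if dataset.get("domain") == domain]
--
-- def is_supp_dataset(datasets: List[dict], domain: str) -> bool:
--     corresponding_datasets = get_corresponding_datasets(datasets, domain)
--     # Check if there are multiple datasets for the domain and if their names match the supp naming convention
--     if len(corresponding_datasets) > 1:
--         return any(
--             dataset.get("filename", "").split(".")[0].lower().startswith("supp")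
--             for dataset in corresponding_datasets
--         )
--     return False
-- ===== SOURCE B (Python) =====
-- def is_supp_dataset(datasets, domain):
--     # Build a grouping index over ALL domains in one pass: for each domain key,
--     # keep (number of datasets, whether any of them has a supp-style filename);
--     # then answer by a single lookup.
--     groups = {}
--     for dataset in datasets:
--         key = dataset.get("domain")
--         cnt, supp = groups.get(key, (0, False))
--         groups[key] = (
--             cnt + 1,
--             supp or dataset.get("filename", "").split(".")[0].lower().startswith("supp"),
--         )
--     cnt, supp = groups.get(domain, (0, False))
--     return cnt > 1 and supp
-- ===== Notes on version B (the rewrite author's own statement) =====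
-- stated objective: alternative
-- what changed: Instead of filtering the list for the queried domain and running len()+any() over the matches, B builds a dict index grouping ALL datasets by their domain key into (count, has-supp-filename) pairs in one pass and then answers with a single dict lookup; no filtered list ever exists and the supp test is applied to every dataset, not only the matches.
import Mathlib
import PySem

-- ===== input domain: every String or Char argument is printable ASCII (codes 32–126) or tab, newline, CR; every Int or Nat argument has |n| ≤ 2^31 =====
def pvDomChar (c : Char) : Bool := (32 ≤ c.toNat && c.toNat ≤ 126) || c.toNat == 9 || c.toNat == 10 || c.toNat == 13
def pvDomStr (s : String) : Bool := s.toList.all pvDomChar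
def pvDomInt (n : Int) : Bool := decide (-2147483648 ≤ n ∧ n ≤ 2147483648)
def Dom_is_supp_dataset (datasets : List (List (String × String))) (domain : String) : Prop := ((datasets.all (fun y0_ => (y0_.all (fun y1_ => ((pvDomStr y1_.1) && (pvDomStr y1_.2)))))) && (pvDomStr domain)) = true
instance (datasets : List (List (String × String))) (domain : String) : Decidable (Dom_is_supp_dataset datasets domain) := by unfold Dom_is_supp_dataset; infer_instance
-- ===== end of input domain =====

-- B replaces A's filter-the-matches-then-len+any structure by a dict index grouping ALL
-- datasets by domain key into (count, has-supp-filename) pairs, answered by one lookup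
-- (objective: alternative data structure, same cost).

-- ===== PORT A =====
-- dataset.get("filename", "").split(".")[0].lower().startswith("supp")
def pvSuppName (dataset : List (String × String)) : Bool :=
  PySem.Str.startswith
    (PySem.Str.lower
      (PySem.List.pyGetD
        ((PySem.Str.split? ((PySem.Dict.mk dataset).getD "filename" "") ".").getD []) 0 ""))
    "supp"

def get_corresponding_datasets (datasets : List (List (String × String))) (domain : String) :
    List (List (String × String)) :=
  datasets.filter (fun dataset => (PySem.Dict.mk dataset).get? "domain" == some domain)

def is_supp_dataset (datasets : List (List (String × String))) (domain : String) : Bool :=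
  let corresponding_datasets := get_corresponding_datasets datasets domain
  if corresponding_datasets.length > 1 then
    corresponding_datasets.any (fun dataset => pvSuppName dataset)
  else false

-- ===== PORT B =====
-- B's own copy of dataset.get("filename", "").split(".")[0].lower().startswith("supp")
def pvSuppNameB (dataset : List (String × String)) : Bool :=
  PySem.Str.startswith
    (PySem.Str.lower
      (PySem.List.pyGetD
        ((PySem.Str.split? ((PySem.Dict.mk dataset).getD "filename" "") ".").getD []) 0 ""))
    "supp"

-- loop body: groups[key] = (cnt + 1, supp or <supp-test>)  keyed by dataset.get("domain") (Option String: None for a missing key)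
def pvGroupStep (g : PySem.Dict (Option String) (Nat × Bool)) (dataset : List (String × String)) :
    PySem.Dict (Option String) (Nat × Bool) :=
  let key := (PySem.Dict.mk dataset).get? "domain"
  let p := g.getD key (0, false)
  g.insert key (p.1 + 1, p.2 || pvSuppNameB dataset)

def is_supp_dataset_alt (datasets : List (List (String × String))) (domain : String) : Bool :=
  let groups := datasets.foldl pvGroupStep PySem.Dict.empty
  let p := groups.getD (some domain) (0, false)
  decide (p.1 > 1) && p.2

-- ===== PRECONDITION & SPEC =====
def Spec_is_supp_dataset (datasets : List (List (String × String))) (domain : String) (out : Bool) : Prop := out = is_supp_dataset_alt datasets domain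
instance (datasets : List (List (String × String))) (domain : String) (out : Bool) : Decidable (Spec_is_supp_dataset datasets domain out) := by unfold Spec_is_supp_dataset; infer_instance

-- ===== CLAIM =====
def Claim_equal_is_supp_dataset : Prop := ∀ (datasets : List (List (String × String))) (domain : String), Dom_is_supp_dataset datasets domain → Spec_is_supp_dataset datasets domain (is_supp_dataset datasets domain)

-- ===== LEMMAS AND PROOFS =====

-- B's group fold, read at key `some domain`, computes exactly the length of and the
-- supp-test's 'any' over A's filtered list.
theorem pv_group_fold (datasets : List (List (String × String))) (domain : String)
    (g : PySem.Dict (Option String) (Nat × Bool)) :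
    (datasets.foldl pvGroupStep g).getD (some domain) (0, false)
    = ((g.getD (some domain) (0, false)).1 + (get_corresponding_datasets datasets domain).length,
       (g.getD (some domain) (0, false)).2
         || (get_corresponding_datasets datasets domain).any (fun dataset => pvSuppNameB dataset)) := by
  induction datasets generalizing g with
  | nil => simp [get_corresponding_datasets]
  | cons d ds ih =>
    rw [List.foldl_cons, ih]
    by_cases h : ((PySem.Dict.mk d).get? "domain" == some domain) = true
    · have hk : (PySem.Dict.mk d).get? "domain" = some domain := by
        simpa using h
      simp [get_corresponding_datasets, pvGroupStep, hk,
        Nat.add_comm, Nat.add_assoc, Nat.add_left_comm, Bool.or_assoc]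
    · have hk : (PySem.Dict.mk d).get? "domain" ≠ some domain := by
        simpa using h
      simp [get_corresponding_datasets, pvGroupStep, h,
        PySem.Dict.getD_insert, Ne.symm hk]

theorem pvSuppNameB_eq (dataset : List (String × String)) :
    pvSuppNameB dataset = pvSuppName dataset := rfl

-- ===== VERDICT =====
theorem is_supp_dataset_spec : Claim_equal_is_supp_dataset := by
  intro datasets domain _
  unfold Spec_is_supp_dataset
  simp only [is_supp_dataset, is_supp_dataset_alt, pv_group_fold,
    PySem.Dict.getD_empty, Nat.zero_add, Bool.false_or, pvSuppNameB_eq]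
  by_cases h : (get_corresponding_datasets datasets domain).length > 1
  · simp [h]
  · simp [h]
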